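-- pv_equiv track=rewrite | github.com/AdamZhouSE/pythonHomework | Code/CodeRecords/2635/60703/271196.py | solution
-- ===== SOURCE A (Python) =====
-- def f(x):
--     cnt = 0
--     while x != 0:
--         cnt += x//5
--         x //= 5
--     return cnt
--
-- def solution(K):
--     base = 4*K
--     while True:
--         v = f(base)
--         if v==K:
--             return 5
--         elif v>K:
--             return 0
--         base+=5
--     return 0
-- ===== SOURCE B (Python) =====
-- def f(x):
--     cnt = 0
--     while x != 0:
--         cnt += x//5
--         x //= 5
--     return cnt
--
-- def solution(K):
--     # binary search: least n in [0, 5K] with f(n) >= K (f is monotone, f(5K) >= K)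
--     lo, hi = 0, 5*K
--     while lo < hi:
--         mid = (lo + hi)//2
--         if f(mid) < K:
--             lo = mid + 1
--         else:
--             hi = mid
--     return 5 if f(lo) == K else 0
-- ===== Notes on version B (the rewrite author's own statement) =====
-- stated objective: alternative
-- what changed: Replaces A's linear step-by-5 scan starting at base=4*K with a binary search on [0,5K] for the least n with f(n)>=K, exploiting the monotonicity of the trailing-zero count f.
-- outside the precondition, e.g. on solution(-1): A does not finish within the time limit, B returns 0
import Mathlib
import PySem

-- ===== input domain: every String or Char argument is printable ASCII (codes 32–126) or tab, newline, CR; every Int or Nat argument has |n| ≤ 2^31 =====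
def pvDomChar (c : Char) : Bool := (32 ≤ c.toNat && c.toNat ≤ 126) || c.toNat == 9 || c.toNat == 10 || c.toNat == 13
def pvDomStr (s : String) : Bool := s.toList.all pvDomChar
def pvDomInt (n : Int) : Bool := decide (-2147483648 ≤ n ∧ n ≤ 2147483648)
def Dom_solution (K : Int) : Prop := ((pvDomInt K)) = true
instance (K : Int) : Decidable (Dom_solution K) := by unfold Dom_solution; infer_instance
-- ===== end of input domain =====

-- B replaces A's linear step-by-5 scan with a binary search on [0,5K] for the
-- least n with f(n) >= K (alternative algorithm, similar cost); Pre_ excludes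
-- K < 0, where A's helper f loops forever.


-- ===== PORT A =====
-- f: trailing zeros of x!; Python's 'while x != 0' guarded by '0 < x' only to
-- make the recursion well-founded (for x < 0 Python diverges; excluded by Pre_).
def fA (x : Int) : Int :=
  if _h : 0 < x then
    PySem.Int.floordiv x 5 + fA (PySem.Int.floordiv x 5)
  else 0
termination_by x.toNat
decreasing_by
  have := PySem.Int.floordiv_eq_ediv_of_pos (a := x) (b := 5) (by omega)
  omega

-- A's 'while True' loop; fuel K.toNat+1 provably suffices inside Pre_ (see proofs).
def loopA (fuel : Nat) (base K : Int) : Int :=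
  match fuel with
  | 0 => 0
  | fuel' + 1 =>
    let v := fA base
    if v = K then 5
    else if v > K then 0
    else loopA fuel' (base + 5) K

def solution (K : Int) : Int := loopA (K.toNat + 1) (4 * K) K

-- ===== PORT B =====
-- binary search: least n in [lo, hi] with fA n ≥ K
def bsearch (lo hi K : Int) : Int :=
  if h : lo < hi then
    let mid := PySem.Int.floordiv (lo + hi) 2
    if fA mid < K then bsearch (mid + 1) hi K
    else bsearch lo mid K
  else lo
termination_by (hi - lo).toNat
decreasing_by
  · have := PySem.Int.floordiv_two_mid_bounds (lo := lo) (hi := hi) (by omega)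
    have h2 := PySem.Int.floordiv_eq_ediv_of_pos (a := lo + hi) (b := 2) (by omega)
    omega
  · have := PySem.Int.floordiv_two_mid_bounds (lo := lo) (hi := hi) (by omega)
    have h2 := PySem.Int.floordiv_eq_ediv_of_pos (a := lo + hi) (b := 2) (by omega)
    omega

def solution_alt (K : Int) : Int :=
  let lo := bsearch 0 (5 * K) K
  if fA lo = K then 5 else 0

-- ===== PRECONDITION & SPEC =====
-- Pre_ excludes K < 0: there A's helper f is called on a negative argument and
-- loops forever (x //= 5 fixes x = -1), so A never returns.
def Pre_solution (K : Int) : Prop := 0 ≤ K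
instance (K : Int) : Decidable (Pre_solution K) := by unfold Pre_solution; infer_instance
def pvWitness_solution : Int := (6)

def Spec_solution (K : Int) (out : Int) : Prop := out = solution_alt K
instance (K : Int) (out : Int) : Decidable (Spec_solution K out) := by unfold Spec_solution; infer_instance

-- ===== CLAIM (what is proved, stated in full; the proofs are below) =====
def Claim_equal_solution : Prop := ∀ (K : Int), Dom_solution K → Pre_solution K → Spec_solution K (solution K)

-- ===== LEMMAS AND PROOFS =====

theorem fA_unfold (x : Int) :
    fA x = if 0 < x then PySem.Int.floordiv x 5 + fA (PySem.Int.floordiv x 5) else 0 := by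
  rw [fA]; split <;> simp_all

theorem fA_pos_eq (x : Int) (hx : 0 < x) : fA x = x / 5 + fA (x / 5) := by
  rw [fA_unfold, if_pos hx, PySem.Int.floordiv_eq_ediv_of_pos (by omega)]

theorem fA_nonpos (x : Int) (hx : x ≤ 0) : fA x = 0 := by
  rw [fA_unfold, if_neg (by omega)]

theorem fA_nonneg (x : Int) : 0 ≤ fA x := by
  by_cases hx : 0 < x
  · rw [fA_pos_eq x hx]
    have := fA_nonneg (x / 5)
    omega
  · rw [fA_nonpos x (by omega)]
termination_by x.toNat
decreasing_by omega

theorem fA_mono (a b : Int) (ha : 0 ≤ a) (hab : a ≤ b) : fA a ≤ fA b := by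
  by_cases hA : 0 < a
  · rw [fA_pos_eq a hA, fA_pos_eq b (by omega)]
    have hq : a / 5 ≤ b / 5 := by omega
    have := fA_mono (a / 5) (b / 5) (by omega) hq
    omega
  · rw [fA_nonpos a (by omega)]
    exact fA_nonneg b
termination_by b.toNat
decreasing_by omega

-- fA depends only on ⌊x/5⌋ (for nonnegative arguments)
theorem fA_block (a b : Int) (ha : 0 ≤ a) (hb : 0 ≤ b) (h : a / 5 = b / 5) :
    fA a = fA b := by
  by_cases hA : 0 < a
  · by_cases hB : 0 < b
    · rw [fA_pos_eq a hA, fA_pos_eq b hB, h]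
    · have hb0 : b = 0 := by omega
      rw [fA_pos_eq a hA, fA_nonpos b (by omega)]
      have : a / 5 = 0 := by omega
      rw [this, fA_nonpos 0 (by omega)]; omega
  · by_cases hB : 0 < b
    · have : b / 5 = 0 := by omega
      rw [fA_pos_eq b hB, this, fA_nonpos a (by omega), fA_nonpos 0 (by omega)]; omega
    · rw [fA_nonpos a (by omega), fA_nonpos b (by omega)]

theorem fA_le_quarter (x : Int) (hx : 0 ≤ x) : 4 * fA x ≤ x := by
  by_cases hA : 0 < x
  · rw [fA_pos_eq x hA]
    have := fA_le_quarter (x / 5) (by omega)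
    omega
  · rw [fA_nonpos x (by omega)]; omega
termination_by x.toNat
decreasing_by omega

theorem fA_5K (K : Int) (hK : 0 ≤ K) : K ≤ fA (5 * K) := by
  by_cases h : 0 < K
  · rw [fA_pos_eq (5 * K) (by omega)]
    have h5 : 5 * K / 5 = K := by omega
    rw [h5]
    have := fA_nonneg K
    omega
  · rw [fA_nonpos (5 * K) (by omega)]; omega

def attained (K : Int) : Prop := ∃ n : Int, 0 ≤ n ∧ fA n = K

-- A-side correctness of the fueled loop
theorem loopA_correct (fuel : Nat) (base K : Int) (hb : 0 ≤ base)
    (hfuel : ∃ t : Nat, t < fuel ∧ K ≤ fA (base + 5 * (t : Int)))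
    (hinv : attained K → ∃ n, base ≤ n ∧ 0 ≤ n ∧ fA n = K) :
    (attained K → loopA fuel base K = 5) ∧ (¬ attained K → loopA fuel base K = 0) := by
  cases fuel with
  | zero => obtain ⟨t, ht, _⟩ := hfuel; omega
  | succ fuel' =>
    unfold loopA
    simp only
    by_cases h1 : fA base = K
    · rw [if_pos h1]
      exact ⟨fun _ => rfl, fun hna => absurd ⟨base, hb, h1⟩ hna⟩
    · rw [if_neg h1]
      by_cases h2 : fA base > K
      · rw [if_pos h2]
        have hna : ¬ attained K := by
          intro ha
          obtain ⟨n, hn1, hn2, hn3⟩ := hinv ha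
          have := fA_mono base n hb hn1
          omega
        exact ⟨fun ha => absurd ha hna, fun _ => rfl⟩
      · rw [if_neg h2]
        have hlt : fA base < K := by omega
        apply loopA_correct fuel' (base + 5) K (by omega)
        · obtain ⟨t, ht, htf⟩ := hfuel
          have ht0 : t ≠ 0 := by
            intro h0; subst h0; simp at htf; omega
          refine ⟨t - 1, by omega, ?_⟩
          have : base + 5 + 5 * ((t - 1 : Nat) : Int) = base + 5 * (t : Int) := by
            have : ((t - 1 : Nat) : Int) = (t : Int) - 1 := by omega
            rw [this]; ring
          rw [this]; exact htf
        · intro ha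
          obtain ⟨n, hn1, hn2, hn3⟩ := hinv ha
          by_cases hbig : base + 5 ≤ n
          · exact ⟨n, hbig, hn2, hn3⟩
          · -- base ≤ n < base + 5: n shares the 5-block of base or of base+5
            by_cases hsame : n / 5 = base / 5
            · exfalso
              have := fA_block n base hn2 hb hsame
              omega
            · have hsame2 : n / 5 = (base + 5) / 5 := by omega
              have := fA_block n (base + 5) hn2 (by omega) hsame2
              exact ⟨base + 5, le_refl _, by omega, by omega⟩

theorem solution_attained (K : Int) (hK : 0 ≤ K) :
    (attained K → solution K = 5) ∧ (¬ attained K → solution K = 0) := by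
  unfold solution
  apply loopA_correct (K.toNat + 1) (4 * K) K (by omega)
  · refine ⟨K.toNat, by omega, ?_⟩
    have h1 : 5 * K ≤ 4 * K + 5 * (K.toNat : Int) := by omega
    have := fA_mono (5 * K) (4 * K + 5 * (K.toNat : Int)) (by omega) h1
    have := fA_5K K hK
    omega
  · rintro ⟨n, hn0, hnf⟩
    by_cases h : 4 * K ≤ n
    · exact ⟨n, h, hn0, hnf⟩
    · -- n < 4*K : then fA (4*K) = K as well
      have h1 := fA_mono n (4 * K) hn0 (by omega)
      have h2 := fA_le_quarter (4 * K) (by omega)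
      exact ⟨4 * K, le_refl _, by omega, by omega⟩

-- B-side: the binary search returns the least n with fA n ≥ K
theorem bsearch_correct (lo hi K : Int) (hlo : 0 ≤ lo) (hle : lo ≤ hi)
    (hhi : K ≤ fA hi) (hbelow : ∀ j, 0 ≤ j → j < lo → fA j < K) :
    let r := bsearch lo hi K
    0 ≤ r ∧ K ≤ fA r ∧ ∀ j, 0 ≤ j → j < r → fA j < K := by
  by_cases h : lo < hi
  · rw [bsearch, dif_pos h]
    have hmid := PySem.Int.floordiv_two_mid_bounds (lo := lo) (hi := hi) (by omega)
    have hmid2 := PySem.Int.floordiv_eq_ediv_of_pos (a := lo + hi) (b := 2) (by omega)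
    set mid := PySem.Int.floordiv (lo + hi) 2 with hmdef
    have hmlt : mid < hi := by omega
    by_cases hf : fA mid < K
    · simp only [if_pos hf]
      apply bsearch_correct (mid + 1) hi K (by omega) (by omega) hhi
      intro j hj hjlt
      by_cases hjlo : j < lo
      · exact hbelow j hj hjlo
      · have := fA_mono j mid (by omega) (by omega)
        omega
    · simp only [if_neg hf]
      exact bsearch_correct lo mid K hlo (by omega) (by omega) hbelow
  · rw [bsearch, dif_neg h]
    have : lo = hi := by omega
    exact ⟨hlo, by omega ▸ (this ▸ hhi), hbelow⟩
termination_by (hi - lo).toNat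
decreasing_by
  · omega
  · omega

theorem solution_alt_attained (K : Int) (hK : 0 ≤ K) :
    (attained K → solution_alt K = 5) ∧ (¬ attained K → solution_alt K = 0) := by
  unfold solution_alt
  have hb := bsearch_correct 0 (5 * K) K (le_refl 0) (by omega) (fA_5K K hK)
    (by intro j hj hjlt; omega)
  obtain ⟨hr0, hrK, hrbelow⟩ := hb
  set r := bsearch 0 (5 * K) K
  by_cases hf : fA r = K
  · rw [if_pos hf]
    exact ⟨fun _ => rfl, fun hna => absurd ⟨r, hr0, hf⟩ hna⟩
  · rw [if_neg hf]
    have hna : ¬ attained K := by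
      rintro ⟨n, hn0, hnf⟩
      by_cases h : n < r
      · have := hrbelow n hn0 h
        omega
      · have := fA_mono r n hr0 (by omega)
        omega
    exact ⟨fun ha => absurd ha hna, fun _ => rfl⟩

-- ===== VERDICT (by name: the statement is the Claim_ definition above) =====
theorem solution_spec : Claim_equal_solution := by
  intro K _ hpre
  unfold Spec_solution
  obtain ⟨hA5, hA0⟩ := solution_attained K hpre
  obtain ⟨hB5, hB0⟩ := solution_alt_attained K hpre
  by_cases h : attained K
  · rw [hA5 h, hB5 h]
  · rw [hA0 h, hB0 h]
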